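-- pv_equiv track=rewrite | github.com/gofarrrr/lolla2 | src/engine/engines/pyramid/multi_persona_formatter.py | _apply_client_focused_consultative_style
-- ===== SOURCE A (Python) =====
-- def _apply_client_focused_consultative_style(content: str) -> str:
--     """Apply client focused consultative communication style for Partner"""
--     style_enhancements = {
--         "analysis": "client-centric consulting analysis",
--         "recommendation": "client value-optimized recommendation",
--         "solution": "tailored client solution",
--         "implementation": "client-focused delivery approach",
--         "benefits": "client business value and benefits",
--     }
--
--     styled_content = content
--     for original, enhancement in style_enhancements.items():
--         styled_content = styled_content.replace(original, enhancement)
--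
--     return styled_content
-- ===== SOURCE B (Python) =====
-- def _apply_client_focused_consultative_style(content: str) -> str:
--     style_enhancements = {
--         "analysis": "client-centric consulting analysis",
--         "recommendation": "client value-optimized recommendation",
--         "solution": "tailored client solution",
--         "implementation": "client-focused delivery approach",
--         "benefits": "client business value and benefits",
--     }
--     out = []
--     i = 0
--     n = len(content)
--     while i < n:
--         for original, enhancement in style_enhancements.items():
--             if content.startswith(original, i):
--                 out.append(enhancement)
--                 i += len(original)
--                 break
--         else:
--             out.append(content[i])
--             i += 1
--     return "".join(out)
-- ===== Notes on version B (the rewrite author's own statement) =====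
-- stated objective: alternative
-- what changed: One left-to-right scan over the input that tries the five keywords at each position and never rescans replacement text, instead of A's five sequential whole-text replace passes.
import Mathlib
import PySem

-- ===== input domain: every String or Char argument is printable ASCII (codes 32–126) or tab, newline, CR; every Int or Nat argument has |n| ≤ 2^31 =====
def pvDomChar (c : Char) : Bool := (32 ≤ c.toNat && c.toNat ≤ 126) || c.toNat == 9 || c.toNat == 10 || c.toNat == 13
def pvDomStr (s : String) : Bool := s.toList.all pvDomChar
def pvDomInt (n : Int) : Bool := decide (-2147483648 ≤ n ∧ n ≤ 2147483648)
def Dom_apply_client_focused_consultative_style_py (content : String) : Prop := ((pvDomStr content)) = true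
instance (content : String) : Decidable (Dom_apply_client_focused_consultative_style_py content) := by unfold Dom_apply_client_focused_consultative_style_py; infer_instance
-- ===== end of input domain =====

-- B replaces A's five sequential whole-text replace passes by ONE left-to-right scan trying the
-- five keywords at each position (objective: alternative single-pass algorithm, same results on Pre_).

-- ===== PORT A =====
def apply_client_focused_consultative_style_py (content : String) : String :=
  let s0 := content
  let s1 := PySem.Str.replace s0 "analysis" "client-centric consulting analysis"
  let s2 := PySem.Str.replace s1 "recommendation" "client value-optimized recommendation"
  let s3 := PySem.Str.replace s2 "solution" "tailored client solution"
  let s4 := PySem.Str.replace s3 "implementation" "client-focused delivery approach"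
  let s5 := PySem.Str.replace s4 "benefits" "client business value and benefits"
  s5

-- ===== PORT B =====
-- Source B scans the input once, trying the five keyword literals in dict order at each position and
-- never rescanning emitted text; this recursion is that scan, step for step (exact: the keywords
-- are plain ASCII literals, startswith = List.isPrefixOf on code points).
def pvScan (s : List Char) : List Char :=
  match s with
  | [] => []
  | c :: t =>
    if ("analysis".toList).isPrefixOf (c :: t) then
      "client-centric consulting analysis".toList ++ pvScan (t.drop 7)
    else if ("recommendation".toList).isPrefixOf (c :: t) then
      "client value-optimized recommendation".toList ++ pvScan (t.drop 13)
    else if ("solution".toList).isPrefixOf (c :: t) then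
      "tailored client solution".toList ++ pvScan (t.drop 7)
    else if ("implementation".toList).isPrefixOf (c :: t) then
      "client-focused delivery approach".toList ++ pvScan (t.drop 13)
    else if ("benefits".toList).isPrefixOf (c :: t) then
      "client business value and benefits".toList ++ pvScan (t.drop 7)
    else c :: pvScan t
termination_by s.length
decreasing_by all_goals (simp [List.length_drop]; try omega)

def apply_client_focused_consultative_style_py_alt (content : String) : String :=
  String.ofList (pvScan content.toList)

-- ===== PRECONDITION & SPEC =====
-- Pre_ excludes content containing "analysisolution" or "benefitsolution": the only inputs where two
-- keyword occurrences overlap or a replacement abuts the rest of a keyword, an unspecified corner on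
-- which A's cascading passes re-replace across a replacement boundary while any single-pass
-- substitution keeps the remainder verbatim — both values are defensible, neither is specified.
def Pre_apply_client_focused_consultative_style_py (content : String) : Prop :=
  PySem.Str.isIn "analysisolution" content = false ∧ PySem.Str.isIn "benefitsolution" content = false
instance (content : String) : Decidable (Pre_apply_client_focused_consultative_style_py content) := by
  unfold Pre_apply_client_focused_consultative_style_py; infer_instance

def pvWitness_apply_client_focused_consultative_style_py : String :=
  "deep analysis shows client benefits"

def Spec_apply_client_focused_consultative_style_py (content : String) (out : String) : Prop :=
  out = apply_client_focused_consultative_style_py_alt content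
instance (content : String) (out : String) : Decidable (Spec_apply_client_focused_consultative_style_py content out) := by
  unfold Spec_apply_client_focused_consultative_style_py; infer_instance

-- ===== CLAIM (what is proved, stated in full; the proofs are below) =====
def Claim_equal_apply_client_focused_consultative_style_py : Prop :=
  ∀ (content : String), Dom_apply_client_focused_consultative_style_py content →
    Pre_apply_client_focused_consultative_style_py content →
    Spec_apply_client_focused_consultative_style_py content (apply_client_focused_consultative_style_py content)

-- ===== LEMMAS AND PROOFS =====

-- The five keywords and their replacement phrases, indexed 0..4 (index ≥ 4 defaults to the last pair).
def pvKeyW : Nat → List Char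
  | 0 => "analysis".toList
  | 1 => "recommendation".toList
  | 2 => "solution".toList
  | 3 => "implementation".toList
  | _ => "benefits".toList

def pvEnhW : Nat → List Char
  | 0 => "client-centric consulting analysis".toList
  | 1 => "client value-optimized recommendation".toList
  | 2 => "tailored client solution".toList
  | 3 => "client-focused delivery approach".toList
  | _ => "client business value and benefits".toList

-- Structural model of one Python str.replace pass (old ≠ [] in every use).
def pvRep (old new : List Char) (s : List Char) : List Char :=
  match s with
  | [] => []
  | c :: t =>
    if old.isPrefixOf (c :: t) then new ++ pvRep old new (t.drop (old.length - 1))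
    else c :: pvRep old new t
termination_by s.length
decreasing_by all_goals (simp [List.length_drop]; try omega)

-- A segment decomposition of the input: literal characters and keyword occurrences, as found by the scan.
inductive PvSeg where
  | chr : Char → PvSeg
  | key : Nat → PvSeg
deriving DecidableEq

-- Render the decomposition after the first n replace passes have run: keyword j is already replaced iff j < n.
def pvRender (n : Nat) : List PvSeg → List Char
  | [] => []
  | PvSeg.chr c :: r => c :: pvRender n r
  | PvSeg.key j :: r => (if j < n then pvEnhW j else pvKeyW j) ++ pvRender n r

def pvSegs (s : List Char) : List PvSeg :=
  match s with
  | [] => []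
  | c :: t =>
    if ("analysis".toList).isPrefixOf (c :: t) then PvSeg.key 0 :: pvSegs (t.drop 7)
    else if ("recommendation".toList).isPrefixOf (c :: t) then PvSeg.key 1 :: pvSegs (t.drop 13)
    else if ("solution".toList).isPrefixOf (c :: t) then PvSeg.key 2 :: pvSegs (t.drop 7)
    else if ("implementation".toList).isPrefixOf (c :: t) then PvSeg.key 3 :: pvSegs (t.drop 13)
    else if ("benefits".toList).isPrefixOf (c :: t) then PvSeg.key 4 :: pvSegs (t.drop 7)
    else PvSeg.chr c :: pvSegs t
termination_by s.length
decreasing_by all_goals (simp [List.length_drop]; try omega)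

-- Well-formedness of a decomposition: no keyword starts at a character position, and no excluded
-- "…s"+"olution" overlap follows a keyword-0/4 occurrence.
def pvGood : List PvSeg → Prop
  | [] => True
  | PvSeg.chr c :: r => (∀ n, n < 5 → ¬ pvKeyW n <+: (c :: pvRender 0 r)) ∧ pvGood r
  | PvSeg.key j :: r => j < 5 ∧ ((j = 0 ∨ j = 4) → ¬ ("olution".toList <+: pvRender 0 r)) ∧ pvGood r

theorem pvKeyDrop {c : Char} {t u : List Char} (k : List Char) (d : Nat) (hd : k.length = d + 1)
    (hu : k ++ u = c :: t) : t.drop d = u := by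
  have h2 : (k ++ u).drop k.length = u := List.drop_left
  rw [hu, hd] at h2
  simpa using h2

theorem pvRender_zero_segs (s : List Char) : pvRender 0 (pvSegs s) = s := by
  induction s using pvSegs.induct with
  | case1 => simp [pvSegs, pvRender]
  | case2 c t h ih =>
    obtain ⟨u, hu⟩ := List.isPrefixOf_iff_prefix.mp h
    have hdrop : t.drop 7 = u := pvKeyDrop _ 7 (by decide) hu
    rw [pvSegs, if_pos h]
    simp only [pvRender]
    rw [if_neg (by omega), hdrop]
    rw [hdrop] at ih
    rw [ih]
    exact hu
  | case3 c t h1 h ih =>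
    obtain ⟨u, hu⟩ := List.isPrefixOf_iff_prefix.mp h
    have hdrop : t.drop 13 = u := pvKeyDrop _ 13 (by decide) hu
    rw [pvSegs, if_neg h1, if_pos h]
    simp only [pvRender]
    rw [if_neg (by omega), hdrop]
    rw [hdrop] at ih
    rw [ih]
    exact hu
  | case4 c t h1 h2 h ih =>
    obtain ⟨u, hu⟩ := List.isPrefixOf_iff_prefix.mp h
    have hdrop : t.drop 7 = u := pvKeyDrop _ 7 (by decide) hu
    rw [pvSegs, if_neg h1, if_neg h2, if_pos h]
    simp only [pvRender]
    rw [if_neg (by omega), hdrop]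
    rw [hdrop] at ih
    rw [ih]
    exact hu
  | case5 c t h1 h2 h3 h ih =>
    obtain ⟨u, hu⟩ := List.isPrefixOf_iff_prefix.mp h
    have hdrop : t.drop 13 = u := pvKeyDrop _ 13 (by decide) hu
    rw [pvSegs, if_neg h1, if_neg h2, if_neg h3, if_pos h]
    simp only [pvRender]
    rw [if_neg (by omega), hdrop]
    rw [hdrop] at ih
    rw [ih]
    exact hu
  | case6 c t h1 h2 h3 h4 h ih =>
    obtain ⟨u, hu⟩ := List.isPrefixOf_iff_prefix.mp h
    have hdrop : t.drop 7 = u := pvKeyDrop _ 7 (by decide) hu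
    rw [pvSegs, if_neg h1, if_neg h2, if_neg h3, if_neg h4, if_pos h]
    simp only [pvRender]
    rw [if_neg (by omega), hdrop]
    rw [hdrop] at ih
    rw [ih]
    exact hu
  | case7 c t h1 h2 h3 h4 h5 ih =>
    rw [pvSegs, if_neg h1, if_neg h2, if_neg h3, if_neg h4, if_neg h5]
    simp only [pvRender]
    rw [ih]

theorem pvScan_eq_render (s : List Char) : pvScan s = pvRender 5 (pvSegs s) := by
  induction s using pvSegs.induct with
  | case1 => simp [pvSegs, pvScan, pvRender]
  | case2 c t h ih =>
    rw [pvSegs, if_pos h, pvScan, if_pos h, ih]; rfl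
  | case3 c t h1 h ih =>
    rw [pvSegs, if_neg h1, if_pos h, pvScan, if_neg h1, if_pos h, ih]; rfl
  | case4 c t h1 h2 h ih =>
    rw [pvSegs, if_neg h1, if_neg h2, if_pos h, pvScan, if_neg h1, if_neg h2, if_pos h, ih]; rfl
  | case5 c t h1 h2 h3 h ih =>
    rw [pvSegs, if_neg h1, if_neg h2, if_neg h3, if_pos h, pvScan,
      if_neg h1, if_neg h2, if_neg h3, if_pos h, ih]; rfl
  | case6 c t h1 h2 h3 h4 h ih =>
    rw [pvSegs, if_neg h1, if_neg h2, if_neg h3, if_neg h4, if_pos h, pvScan,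
      if_neg h1, if_neg h2, if_neg h3, if_neg h4, if_pos h, ih]; rfl
  | case7 c t h1 h2 h3 h4 h5 ih =>
    rw [pvSegs, if_neg h1, if_neg h2, if_neg h3, if_neg h4, if_neg h5, pvScan,
      if_neg h1, if_neg h2, if_neg h3, if_neg h4, if_neg h5, ih]; rfl

theorem pvGood_segs (s : List Char)
    (h1 : ¬ ("analysisolution".toList <:+: s)) (h2 : ¬ ("benefitsolution".toList <:+: s)) :
    pvGood (pvSegs s) := by
  induction s using pvSegs.induct with
  | case1 => simp [pvSegs, pvGood]
  | case2 c t h ih =>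
    obtain ⟨u, hu⟩ := List.isPrefixOf_iff_prefix.mp h
    have hdrop : t.drop 7 = u := pvKeyDrop _ 7 (by decide) hu
    have hsub : ∀ w : List Char, w <:+: t.drop 7 → w <:+: c :: t := by
      intro w hw
      rw [hdrop] at hw
      exact hw.trans ⟨"analysis".toList, [], by simpa using hu⟩
    rw [pvSegs, if_pos h]
    refine ⟨by omega, ?_, ih (fun hx => h1 (hsub _ hx)) (fun hx => h2 (hsub _ hx))⟩
    intro _ holu
    rw [pvRender_zero_segs, hdrop] at holu
    obtain ⟨v, hv⟩ := holu
    apply h1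
    refine ⟨[], v, ?_⟩
    have hbad : ("analysisolution".toList : List Char) = "analysis".toList ++ "olution".toList := by decide
    rw [List.nil_append, hbad, List.append_assoc, hv, hu]
  | case3 c t h1' h ih =>
    obtain ⟨u, hu⟩ := List.isPrefixOf_iff_prefix.mp h
    have hdrop : t.drop 13 = u := pvKeyDrop _ 13 (by decide) hu
    have hsub : ∀ w : List Char, w <:+: t.drop 13 → w <:+: c :: t := by
      intro w hw
      rw [hdrop] at hw
      exact hw.trans ⟨"recommendation".toList, [], by simpa using hu⟩
    rw [pvSegs, if_neg h1', if_pos h]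
    exact ⟨by omega, by intro hj; exact absurd hj (by decide),
      ih (fun hx => h1 (hsub _ hx)) (fun hx => h2 (hsub _ hx))⟩
  | case4 c t h1' h2' h ih =>
    obtain ⟨u, hu⟩ := List.isPrefixOf_iff_prefix.mp h
    have hdrop : t.drop 7 = u := pvKeyDrop _ 7 (by decide) hu
    have hsub : ∀ w : List Char, w <:+: t.drop 7 → w <:+: c :: t := by
      intro w hw
      rw [hdrop] at hw
      exact hw.trans ⟨"solution".toList, [], by simpa using hu⟩
    rw [pvSegs, if_neg h1', if_neg h2', if_pos h]
    exact ⟨by omega, by intro hj; exact absurd hj (by decide),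
      ih (fun hx => h1 (hsub _ hx)) (fun hx => h2 (hsub _ hx))⟩
  | case5 c t h1' h2' h3' h ih =>
    obtain ⟨u, hu⟩ := List.isPrefixOf_iff_prefix.mp h
    have hdrop : t.drop 13 = u := pvKeyDrop _ 13 (by decide) hu
    have hsub : ∀ w : List Char, w <:+: t.drop 13 → w <:+: c :: t := by
      intro w hw
      rw [hdrop] at hw
      exact hw.trans ⟨"implementation".toList, [], by simpa using hu⟩
    rw [pvSegs, if_neg h1', if_neg h2', if_neg h3', if_pos h]
    exact ⟨by omega, by intro hj; exact absurd hj (by decide),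
      ih (fun hx => h1 (hsub _ hx)) (fun hx => h2 (hsub _ hx))⟩
  | case6 c t h1' h2' h3' h4' h ih =>
    obtain ⟨u, hu⟩ := List.isPrefixOf_iff_prefix.mp h
    have hdrop : t.drop 7 = u := pvKeyDrop _ 7 (by decide) hu
    have hsub : ∀ w : List Char, w <:+: t.drop 7 → w <:+: c :: t := by
      intro w hw
      rw [hdrop] at hw
      exact hw.trans ⟨"benefits".toList, [], by simpa using hu⟩
    rw [pvSegs, if_neg h1', if_neg h2', if_neg h3', if_neg h4', if_pos h]
    refine ⟨by omega, ?_, ih (fun hx => h1 (hsub _ hx)) (fun hx => h2 (hsub _ hx))⟩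
    intro _ holu
    rw [pvRender_zero_segs, hdrop] at holu
    obtain ⟨v, hv⟩ := holu
    apply h2
    refine ⟨[], v, ?_⟩
    have hbad : ("benefitsolution".toList : List Char) = "benefits".toList ++ "olution".toList := by decide
    rw [List.nil_append, hbad, List.append_assoc, hv, hu]
  | case7 c t h1' h2' h3' h4' h5' ih =>
    have hsub : ∀ w : List Char, w <:+: t → w <:+: c :: t := by
      intro w hw
      exact hw.trans (List.suffix_cons c t).isInfix
    rw [pvSegs, if_neg h1', if_neg h2', if_neg h3', if_neg h4', if_neg h5']
    refine ⟨?_, ih (fun hx => h1 (hsub _ hx)) (fun hx => h2 (hsub _ hx))⟩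
    intro n hn
    rw [pvRender_zero_segs]
    intro hpre
    interval_cases n
    · exact h1' (List.isPrefixOf_iff_prefix.mpr hpre)
    · exact h2' (List.isPrefixOf_iff_prefix.mpr hpre)
    · exact h3' (List.isPrefixOf_iff_prefix.mpr hpre)
    · exact h4' (List.isPrefixOf_iff_prefix.mpr hpre)
    · exact h5' (List.isPrefixOf_iff_prefix.mpr hpre)

theorem pvPrefix_of_append_of_le {w x y : List Char} (h : w <+: x ++ y) (hl : w.length ≤ x.length) :
    w <+: x := by
  rcases List.prefix_or_prefix_of_prefix h (List.prefix_append x y) with h' | h'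
  · exact h'
  · have := h'.eq_of_length_le hl
    exact this ▸ List.prefix_rfl

theorem pvPrefix_split {w x y : List Char} (h : w <+: x ++ y) (hl : x.length ≤ w.length) :
    x <+: w ∧ w.drop x.length <+: y := by
  rcases List.prefix_or_prefix_of_prefix (List.prefix_append x y) h with h' | h'
  · refine ⟨h', ?_⟩
    obtain ⟨z, hz⟩ := h'
    obtain ⟨u, hu⟩ := h
    subst hz
    rw [List.append_assoc] at hu
    have := List.append_cancel_left hu
    exact ⟨u, by simpa [List.drop_left] using this⟩
  · exact ⟨(h'.eq_of_length_le hl) ▸ List.prefix_rfl, by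
      have := h'.eq_of_length_le hl
      subst this
      simp⟩

theorem pvPrefix_persist (segs : List PvSeg) (n : Nat) (w : List Char)
    (hsafe : ∀ o, o < w.length → ∀ j, ¬ (w.drop o <+: pvEnhW j))
    (hlen : ∀ j, w.length ≤ (pvEnhW j).length)
    (h : w <+: pvRender n segs) : w <+: pvRender 0 segs := by
  induction segs generalizing w with
  | nil => simpa [pvRender] using h
  | cons seg r ih =>
    cases seg with
    | chr c =>
      cases w with
      | nil => exact List.nil_prefix
      | cons c' w' =>
        simp only [pvRender] at h ⊢
        rw [List.cons_prefix_cons] at h ⊢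
        refine ⟨h.1, ih w' ?_ ?_ h.2⟩
        · intro o ho j
          have := hsafe (o + 1) (by simp; omega) j
          simpa using this
        · intro j
          have := hlen j
          simp at this ⊢
          omega
    | key j =>
      by_cases hjn : j < n
      · simp only [pvRender, if_pos hjn] at h
        cases w with
        | nil => exact List.nil_prefix
        | cons c' w' =>
          have hw : (c' :: w') <+: pvEnhW j := pvPrefix_of_append_of_le h (hlen j)
          exact absurd hw (by simpa using hsafe 0 (by simp) j)
      · simp only [pvRender, if_neg hjn] at h
        simp only [pvRender, if_neg (show ¬ j < 0 by omega)]
        by_cases hl : w.length ≤ (pvKeyW j).length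
        · exact (pvPrefix_of_append_of_le h hl).trans (List.prefix_append _ _)
        · rw [Nat.not_le] at hl
          obtain ⟨hkw, hdrop⟩ := pvPrefix_split h (le_of_lt hl)
          obtain ⟨z, hz⟩ := hkw
          have hzdrop : z = w.drop (pvKeyW j).length := by
            rw [← hz]
            simp
          have ihz : w.drop (pvKeyW j).length <+: pvRender 0 r := by
            refine ih _ ?_ ?_ hdrop
            · intro o ho j'
              have := hsafe ((pvKeyW j).length + o) (by simp at ho; omega) j'
              simpa [List.drop_drop, Nat.add_comm] using this
            · intro j'
              have := hlen j'
              simp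
              omega
          obtain ⟨u, hu⟩ := ihz
          refine ⟨u, ?_⟩
          rw [← hz, hzdrop, List.append_assoc, hu]

theorem pvRep_step (old new X : List Char) (h : old ≠ []) :
    pvRep old new (old ++ X) = new ++ pvRep old new X := by
  cases old with
  | nil => exact absurd rfl h
  | cons c k =>
    show pvRep (c :: k) new (c :: (k ++ X)) = _
    rw [pvRep]
    rw [if_pos (List.isPrefixOf_iff_prefix.mpr ⟨X, by simp⟩)]
    simp

theorem pvRep_skip (b : List Char) (X old new : List Char)
    (h : ∀ o, o < b.length → ¬ (old <+: (b.drop o ++ X))) :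
    pvRep old new (b ++ X) = b ++ pvRep old new X := by
  induction b with
  | nil => simp
  | cons c b' ih =>
    show pvRep old new (c :: (b' ++ X)) = _
    rw [pvRep]
    rw [if_neg (by
      intro hp
      exact h 0 (by simp) (by simpa using List.isPrefixOf_iff_prefix.mp hp))]
    rw [ih (fun o ho => by simpa using h (o + 1) (by simp; omega))]
    rfl

theorem pvFact1 : ∀ n, n < 5 → ∀ j, j < 5 → j ≠ n →
    ¬ (pvKeyW n <:+: pvEnhW j) ∧ ¬ (pvKeyW n <:+: pvKeyW j) := by decide

theorem pvFact2 : ∀ n, n < 5 → ∀ j, j < 5 → ∀ m, m < 14 → 1 ≤ m → m < (pvKeyW n).length →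
    (((pvKeyW n).take m) <:+ pvEnhW j ∨ ((pvKeyW n).take m) <:+ pvKeyW j) →
    n = 2 ∧ m = 1 ∧ (j = 0 ∨ j = 4) := by
  intro n hn j hj m hm
  interval_cases n <;> interval_cases j <;> interval_cases m <;> decide

theorem pvNoMatch (n j : Nat) (hn : n < 5) (hj : j < 5) (hne : j ≠ n) (b : List Char)
    (hb : b = pvEnhW j ∨ b = pvKeyW j) (X : List Char)
    (hX : (j = 0 ∨ j = 4) → ¬ ("olution".toList <+: X)) :
    ∀ o, o < b.length → ¬ (pvKeyW n <+: (b.drop o ++ X)) := by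
  intro o ho hpre
  by_cases hl : (pvKeyW n).length ≤ (b.drop o).length
  · have hb1 : pvKeyW n <+: b.drop o := pvPrefix_of_append_of_le hpre hl
    have hb2 : pvKeyW n <:+: b := hb1.isInfix.trans (List.drop_suffix o b).isInfix
    rcases hb with rfl | rfl
    · exact (pvFact1 n hn j hj hne).1 hb2
    · exact (pvFact1 n hn j hj hne).2 hb2
  · rw [Nat.not_le] at hl
    obtain ⟨hbk, hdr⟩ := pvPrefix_split hpre (le_of_lt hl)
    have htake : b.drop o = (pvKeyW n).take (b.drop o).length := List.prefix_iff_eq_take.mp hbk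
    have hsuf : (pvKeyW n).take (b.drop o).length <:+ b := htake ▸ List.drop_suffix o b
    have hlenb : (b.drop o).length = b.length - o := by simp
    have hkb : (pvKeyW n).length ≤ 14 := by interval_cases n <;> decide
    have hfact := pvFact2 n hn j hj (b.drop o).length (by omega) (by omega) hl
      (by
        rcases hb with rfl | rfl
        · exact Or.inl hsuf
        · exact Or.inr hsuf)
    obtain ⟨hn2, hm1, hj04⟩ := hfact
    apply hX hj04
    have holudef : ("olution".toList : List Char) = (pvKeyW 2).drop 1 := by decide
    rw [holudef, ← hn2, ← hm1]
    exact hdr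

theorem pvEnhW_eq (j : Nat) : pvEnhW j = pvEnhW 0 ∨ pvEnhW j = pvEnhW 1 ∨ pvEnhW j = pvEnhW 2 ∨
    pvEnhW j = pvEnhW 3 ∨ pvEnhW j = pvEnhW 4 := by
  match j with
  | 0 => exact Or.inl rfl
  | 1 => exact Or.inr (Or.inl rfl)
  | 2 => exact Or.inr (Or.inr (Or.inl rfl))
  | 3 => exact Or.inr (Or.inr (Or.inr (Or.inl rfl)))
  | m + 4 => exact Or.inr (Or.inr (Or.inr (Or.inr rfl)))

theorem pvSafeWord : ∀ w ∈ ["analysis".toList, "recommendation".toList, "solution".toList,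
    "implementation".toList, "benefits".toList, "olution".toList],
    (∀ o, o < w.length → ∀ j, j < 5 → ¬ (w.drop o <+: pvEnhW j)) ∧
    (∀ j, j < 5 → w.length ≤ (pvEnhW j).length) := by decide

theorem pvSafe_any (w : List Char)
    (hw : (∀ o, o < w.length → ∀ j, j < 5 → ¬ (w.drop o <+: pvEnhW j)) ∧
      (∀ j, j < 5 → w.length ≤ (pvEnhW j).length)) :
    (∀ o, o < w.length → ∀ j, ¬ (w.drop o <+: pvEnhW j)) ∧
    (∀ j, w.length ≤ (pvEnhW j).length) := by
  constructor
  · intro o ho j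
    rcases pvEnhW_eq j with h | h | h | h | h <;> rw [h]
    · exact hw.1 o ho 0 (by omega)
    · exact hw.1 o ho 1 (by omega)
    · exact hw.1 o ho 2 (by omega)
    · exact hw.1 o ho 3 (by omega)
    · exact hw.1 o ho 4 (by omega)
  · intro j
    rcases pvEnhW_eq j with h | h | h | h | h <;> rw [h]
    · exact hw.2 0 (by omega)
    · exact hw.2 1 (by omega)
    · exact hw.2 2 (by omega)
    · exact hw.2 3 (by omega)
    · exact hw.2 4 (by omega)

theorem pvSafeKey (n : Nat) (hn : n < 5) :
    (∀ o, o < (pvKeyW n).length → ∀ j, ¬ ((pvKeyW n).drop o <+: pvEnhW j)) ∧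
    (∀ j, (pvKeyW n).length ≤ (pvEnhW j).length) :=
  pvSafe_any _ (by interval_cases n <;> exact pvSafeWord _ (by decide))

theorem pvSafeOlu :
    (∀ o, o < ("olution".toList : List Char).length → ∀ j, ¬ (("olution".toList : List Char).drop o <+: pvEnhW j)) ∧
    (∀ j, ("olution".toList : List Char).length ≤ (pvEnhW j).length) :=
  pvSafe_any _ (pvSafeWord _ (by decide))

theorem pvCommute (segs : List PvSeg) (hg : pvGood segs) (n : Nat) (hn : n < 5) :
    pvRep (pvKeyW n) (pvEnhW n) (pvRender n segs) = pvRender (n + 1) segs := by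
  induction segs with
  | nil => simp [pvRender, pvRep]
  | cons seg r ih =>
    cases seg with
    | chr c =>
      obtain ⟨hchr, hg'⟩ := hg
      show pvRep (pvKeyW n) (pvEnhW n) (c :: pvRender n r) = c :: pvRender (n + 1) r
      rw [pvRep]
      rw [if_neg (by
        intro hp
        exact hchr n hn (pvPrefix_persist (PvSeg.chr c :: r) n (pvKeyW n)
          (pvSafeKey n hn).1 (pvSafeKey n hn).2 (List.isPrefixOf_iff_prefix.mp hp)))]
      rw [ih hg']
    | key j =>
      obtain ⟨hj5, hkey, hg'⟩ := hg
      by_cases hjn : j = n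
      · subst hjn
        show pvRep (pvKeyW j) (pvEnhW j) ((if j < j then pvEnhW j else pvKeyW j) ++ pvRender j r) =
          (if j < j + 1 then pvEnhW j else pvKeyW j) ++ pvRender (j + 1) r
        rw [if_neg (lt_irrefl j), if_pos (by omega)]
        rw [pvRep_step _ _ _ (by interval_cases j <;> decide)]
        rw [ih hg']
      · have hXolu : (j = 0 ∨ j = 4) → ¬ ("olution".toList <+: pvRender n r) := by
          intro hj04 holu
          exact hkey hj04 (pvPrefix_persist r n _ pvSafeOlu.1 pvSafeOlu.2 holu)
        show pvRep (pvKeyW n) (pvEnhW n) ((if j < n then pvEnhW j else pvKeyW j) ++ pvRender n r) =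
          (if j < n + 1 then pvEnhW j else pvKeyW j) ++ pvRender (n + 1) r
        by_cases hjlt : j < n
        · rw [if_pos hjlt, if_pos (by omega)]
          rw [pvRep_skip _ _ _ _ (pvNoMatch n j hn hj5 hjn _ (Or.inl rfl) _ hXolu)]
          rw [ih hg']
        · rw [if_neg hjlt, if_neg (by omega)]
          rw [pvRep_skip _ _ _ _ (pvNoMatch n j hn hj5 hjn _ (Or.inr rfl) _ hXolu)]
          rw [ih hg']

theorem pvRep_go (old new : List Char) (h : old ≠ []) :
    ∀ fuel l acc, l.length ≤ fuel →
      PySem.Chars.replace.go old new fuel l acc = acc.reverse ++ pvRep old new l := by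
  intro fuel
  induction fuel with
  | zero =>
    intro l acc hl
    have hnil : l = [] := List.eq_nil_of_length_eq_zero (by omega)
    subst hnil
    simp [PySem.Chars.replace.go, pvRep]
  | succ f ihf =>
    intro l acc hl
    cases l with
    | nil => simp [PySem.Chars.replace.go, pvRep]
    | cons c t =>
      have hpos : 1 ≤ old.length := by
        cases old with
        | nil => exact absurd rfl h
        | cons _ _ => simp
      rw [PySem.Chars.replace.go]
      by_cases hp : old.isPrefixOf (c :: t)
      · rw [if_pos hp]
        rw [ihf _ _ (by simp at hl ⊢; omega)]
        rw [pvRep, if_pos hp]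
        obtain ⟨m, hm⟩ : ∃ m, old.length = m + 1 := ⟨old.length - 1, by omega⟩
        rw [hm]
        simp [List.drop_succ_cons]
      · rw [if_neg hp]
        rw [ihf _ _ (by simp at hl ⊢; omega)]
        rw [pvRep, if_neg hp]
        simp

theorem pvReplace_eq_pvRep (s old new : List Char) (h : old ≠ []) :
    PySem.Chars.replace s old new = pvRep old new s := by
  rw [PySem.Chars.replace]
  rw [if_neg (by simpa [List.isEmpty_iff] using h)]
  simpa using pvRep_go old new h s.length s [] le_rfl

theorem pvChain (s : List Char)
    (hs1 : ¬ ("analysisolution".toList <:+: s)) (hs2 : ¬ ("benefitsolution".toList <:+: s)) :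
    pvRep (pvKeyW 4) (pvEnhW 4) (pvRep (pvKeyW 3) (pvEnhW 3) (pvRep (pvKeyW 2) (pvEnhW 2)
      (pvRep (pvKeyW 1) (pvEnhW 1) (pvRep (pvKeyW 0) (pvEnhW 0) s)))) = pvScan s := by
  have hgood := pvGood_segs s hs1 hs2
  rw [pvScan_eq_render]
  conv_lhs => rw [← pvRender_zero_segs s]
  rw [pvCommute _ hgood 0 (by omega), pvCommute _ hgood 1 (by omega),
    pvCommute _ hgood 2 (by omega), pvCommute _ hgood 3 (by omega),
    pvCommute _ hgood 4 (by omega)]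

-- ===== VERDICT (by name: the statement is the Claim_ definition above) =====
theorem apply_client_focused_consultative_style_py_spec : Claim_equal_apply_client_focused_consultative_style_py := by
  intro content _hdom hpre
  obtain ⟨h1, h2⟩ := hpre
  have hinf1 : ¬ ("analysisolution".toList <:+: content.toList) := by
    intro hx
    rw [← PySem.Str.isIn_iff_infix] at hx
    rw [h1] at hx
    exact Bool.false_ne_true hx
  have hinf2 : ¬ ("benefitsolution".toList <:+: content.toList) := by
    intro hx
    rw [← PySem.Str.isIn_iff_infix] at hx
    rw [h2] at hx
    exact Bool.false_ne_true hx
  unfold Spec_apply_client_focused_consultative_style_py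
  have hlists : (apply_client_focused_consultative_style_py content).toList = pvScan content.toList := by
    unfold apply_client_focused_consultative_style_py
    simp only [PySem.Str.replace, String.toList_ofList]
    rw [pvReplace_eq_pvRep _ _ _ (by decide), pvReplace_eq_pvRep _ _ _ (by decide),
      pvReplace_eq_pvRep _ _ _ (by decide), pvReplace_eq_pvRep _ _ _ (by decide),
      pvReplace_eq_pvRep _ _ _ (by decide)]
    exact pvChain content.toList hinf1 hinf2
  calc apply_client_focused_consultative_style_py content
      = String.ofList ((apply_client_focused_consultative_style_py content).toList) :=
        String.ofList_toList.symm
    _ = apply_client_focused_consultative_style_py_alt content := by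
        rw [hlists]
        rfl
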